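-- pv_equiv track=rewrite | github.com/wanglalalalala/CS5260 | RAG_Component/agent/tools.py | filter_by_brand
-- ===== SOURCE A (Python) =====
-- def filter_by_brand(
--     products: list[dict],
--     allowed_brands: list[str] | None = None,
--     excluded_brands: list[str] | None = None,
-- ) -> list[dict]:
--     """Include / exclude products by brand (case-insensitive)."""
--     result = products
--     if allowed_brands:
--         lower = {b.lower() for b in allowed_brands}
--         result = [p for p in result if p.get("brand", "").lower() in lower]
--     if excluded_brands:
--         lower_ex = {b.lower() for b in excluded_brands}
--         result = [p for p in result if p.get("brand", "").lower() not in lower_ex]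
--     return result
-- ===== SOURCE B (Python) =====
-- def filter_by_brand(
--     products: list[dict],
--     allowed_brands: list[str] | None = None,
--     excluded_brands: list[str] | None = None,
-- ) -> list[dict]:
--     """Include / exclude products by brand (case-insensitive).
--
--     Memoises the keep/drop decision per distinct lowered brand in a dict and
--     decides each new brand with linear any/all scans over the brand lists."""
--     decisions = {}
--     out = []
--     for p in products:
--         b = p.get("brand", "").lower()
--         if b not in decisions:
--             ok = not allowed_brands or any(x.lower() == b for x in allowed_brands)
--             if ok and excluded_brands:
--                 ok = all(x.lower() != b for x in excluded_brands)
--             decisions[b] = ok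
--         if decisions[b]:
--             out.append(p)
--     return out
-- ===== Notes on version B (the rewrite author's own statement) =====
-- stated objective: alternative
-- what changed: Instead of A's two staged set-membership filtering passes, B memoises a keep/drop decision per distinct lowered brand in a dict and decides each newly seen brand with linear any/all scans over the raw brand lists (no lowered sets are built), appending kept products in one loop.
import Mathlib
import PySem

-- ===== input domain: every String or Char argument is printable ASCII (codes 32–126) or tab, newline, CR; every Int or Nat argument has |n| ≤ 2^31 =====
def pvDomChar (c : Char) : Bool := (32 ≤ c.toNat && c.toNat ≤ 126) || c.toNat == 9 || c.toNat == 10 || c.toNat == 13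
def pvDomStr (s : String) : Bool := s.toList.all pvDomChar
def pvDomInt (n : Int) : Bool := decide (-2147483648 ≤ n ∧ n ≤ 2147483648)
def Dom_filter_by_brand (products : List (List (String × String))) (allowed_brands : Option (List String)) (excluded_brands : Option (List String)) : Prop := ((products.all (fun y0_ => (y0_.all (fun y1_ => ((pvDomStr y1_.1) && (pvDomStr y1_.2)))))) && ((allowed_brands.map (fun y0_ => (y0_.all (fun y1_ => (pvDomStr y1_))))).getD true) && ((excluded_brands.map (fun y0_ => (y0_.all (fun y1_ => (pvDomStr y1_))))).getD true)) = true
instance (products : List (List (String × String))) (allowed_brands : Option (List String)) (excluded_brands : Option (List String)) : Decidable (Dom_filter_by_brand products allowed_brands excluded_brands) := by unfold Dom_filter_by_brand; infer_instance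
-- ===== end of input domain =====

-- B replaces A's two staged set-membership filtering passes with one loop that memoises a keep/drop decision per distinct lowered brand (dict) decided by linear any/all scans over the raw brand lists (alternative decomposition, same cost).


-- ===== PORT A =====
def filter_by_brand (products : List (List (String × String))) (allowed_brands : Option (List String)) (excluded_brands : Option (List String)) : List (List (String × String)) :=
  let result := products
  let result :=
    match allowed_brands with
    | some bs =>
      if bs ≠ [] then
        let lower := PySem.Set.ofList (bs.map PySem.Str.lower)
        result.filter (fun p => PySem.Set.contains lower (PySem.Str.lower ((PySem.Dict.mk p).getD "brand" "")))
      else result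
    | none => result
  let result :=
    match excluded_brands with
    | some bs =>
      if bs ≠ [] then
        let lower_ex := PySem.Set.ofList (bs.map PySem.Str.lower)
        result.filter (fun p => !(PySem.Set.contains lower_ex (PySem.Str.lower ((PySem.Dict.mk p).getD "brand" ""))))
      else result
    | none => result
  result

-- ===== PORT B =====
-- truthiness of a 'list[str] | None' argument (Python: None and [] are falsy)
def pvTruthy : Option (List String) → Bool
  | none => false
  | some [] => false
  | some (_ :: _) => true

-- the decision B computes for a brand it has not seen yet
def pvDecide (allowed_brands excluded_brands : Option (List String)) (b : String) : Bool :=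
  let ok := !pvTruthy allowed_brands
            || (allowed_brands.getD []).any (fun x => PySem.Str.lower x == b)
  if ok && pvTruthy excluded_brands then
    (excluded_brands.getD []).all (fun x => !(PySem.Str.lower x == b))
  else ok

def filter_by_brand_alt (products : List (List (String × String))) (allowed_brands : Option (List String)) (excluded_brands : Option (List String)) : List (List (String × String)) :=
  (products.foldl
    (fun (st : PySem.Dict String Bool × List (List (String × String))) p =>
      let b := PySem.Str.lower ((PySem.Dict.mk p).getD "brand" "")
      let decisions :=
        if st.1.contains b then st.1
        else st.1.insert b (pvDecide allowed_brands excluded_brands b)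
      (decisions, if decisions.getD b false then st.2 ++ [p] else st.2))
    (PySem.Dict.empty, [])).2

-- ===== PRECONDITION & SPEC =====
def Spec_filter_by_brand (products : List (List (String × String))) (allowed_brands : Option (List String)) (excluded_brands : Option (List String)) (out : List (List (String × String))) : Prop := out = filter_by_brand_alt products allowed_brands excluded_brands
instance (products : List (List (String × String))) (allowed_brands : Option (List String)) (excluded_brands : Option (List String)) (out : List (List (String × String))) : Decidable (Spec_filter_by_brand products allowed_brands excluded_brands out) := by unfold Spec_filter_by_brand; infer_instance

-- ===== CLAIM (what is proved, stated in full; the proofs are below) =====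
def Claim_equal_filter_by_brand : Prop := ∀ (products : List (List (String × String))) (allowed_brands : Option (List String)) (excluded_brands : Option (List String)), Dom_filter_by_brand products allowed_brands excluded_brands → Spec_filter_by_brand products allowed_brands excluded_brands (filter_by_brand products allowed_brands excluded_brands)

-- ===== LEMMAS AND PROOFS =====

-- the lowered brand of a product (shared shape of both ports' per-product key)
def pvBrand (p : List (String × String)) : String :=
  PySem.Str.lower ((PySem.Dict.mk p).getD "brand" "")

-- membership in A's lowered set = B's linear scan
lemma pv_set_scan (bs : List String) (b : String) :
    PySem.Set.contains (PySem.Set.ofList (bs.map PySem.Str.lower)) b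
      = bs.any (fun x => PySem.Str.lower x == b) := by
  rw [Bool.eq_iff_iff, PySem.Set.contains_iff, PySem.Set.mem_ofList, List.any_eq_true,
    List.mem_map]
  constructor
  · rintro ⟨x, hx, rfl⟩; exact ⟨x, hx, by simp⟩
  · rintro ⟨x, hx, h⟩; exact ⟨x, hx, eq_of_beq h⟩

-- B's memoised fold builds acc ++ filter by pvDecide, under the memo invariant
lemma pv_fold_eq_filter (a e : Option (List String))
    (l : List (List (String × String))) (d : PySem.Dict String Bool)
    (acc : List (List (String × String)))
    (hinv : ∀ k, d.contains k = true → d.getD k false = pvDecide a e k) :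
    (l.foldl
      (fun (st : PySem.Dict String Bool × List (List (String × String))) p =>
        let b := PySem.Str.lower ((PySem.Dict.mk p).getD "brand" "")
        let decisions :=
          if st.1.contains b then st.1
          else st.1.insert b (pvDecide a e b)
        (decisions, if decisions.getD b false then st.2 ++ [p] else st.2))
      (d, acc)).2
    = acc ++ l.filter (fun p => pvDecide a e (pvBrand p)) := by
  induction l generalizing d acc with
  | nil => simp
  | cons p l ih =>
    simp only [List.foldl_cons, List.filter_cons]
    by_cases h : d.contains (pvBrand p) = true
    · have hd : d.getD (pvBrand p) false = pvDecide a e (pvBrand p) := hinv _ h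
      simp only [pvBrand] at h hd
      rw [if_pos h, hd]
      by_cases hk : pvDecide a e (pvBrand p) = true
      · simp only [pvBrand] at hk
        rw [if_pos hk, ih d (acc ++ [p]) hinv]
        simp [pvBrand, hk]
      · simp only [pvBrand] at hk
        rw [if_neg hk, ih d acc hinv]
        simp [pvBrand, hk]
    · have h' : d.contains (pvBrand p) = false := by simpa using h
      simp only [pvBrand] at h'
      rw [if_neg (by simp [h'])]
      have hd : (d.insert (pvBrand p) (pvDecide a e (pvBrand p))).getD (pvBrand p) false
          = pvDecide a e (pvBrand p) := PySem.Dict.getD_insert_self _ _ _ _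
      have hinv' : ∀ k, (d.insert (pvBrand p) (pvDecide a e (pvBrand p))).contains k = true →
          (d.insert (pvBrand p) (pvDecide a e (pvBrand p))).getD k false = pvDecide a e k := by
        intro k hk
        by_cases hkb : k = pvBrand p
        · subst hkb; exact hd
        · rw [PySem.Dict.getD_insert]
          rw [PySem.Dict.contains_insert] at hk
          simp only [if_neg hkb]
          apply hinv
          simpa [hkb] using hk
      simp only [pvBrand] at hd
      by_cases hk : pvDecide a e (pvBrand p) = true
      · simp only [pvBrand] at hk
        rw [hd, if_pos hk, ih _ (acc ++ [p]) (by simpa [pvBrand] using hinv')]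
        simp [pvBrand, hk]
      · simp only [pvBrand] at hk
        rw [hd, if_neg hk, ih _ acc (by simpa [pvBrand] using hinv')]
        simp [pvBrand, hk]

lemma pv_B_eq_filter (products : List (List (String × String)))
    (a e : Option (List String)) :
    filter_by_brand_alt products a e
      = products.filter (fun p => pvDecide a e (pvBrand p)) := by
  have := pv_fold_eq_filter a e products PySem.Dict.empty []
    (by intro k hk; simp [PySem.Dict.contains_empty] at hk)
  simpa [filter_by_brand_alt] using this

-- ===== VERDICT (by name: the statement is the Claim_ definition above) =====
theorem filter_by_brand_spec : Claim_equal_filter_by_brand := by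
  intro products a e _
  unfold Spec_filter_by_brand
  rw [pv_B_eq_filter]
  unfold filter_by_brand
  cases a with
  | none =>
    cases e with
    | none => simp [pvDecide, pvTruthy]
    | some ebs =>
      cases ebs with
      | nil => simp [pvDecide, pvTruthy]
      | cons ex exs =>
        simp only [ne_eq, reduceCtorEq, not_false_iff, if_pos]
        refine List.filter_congr ?_
        intro p _
        rw [pv_set_scan, List.not_any_eq_all_not]
        simp [pvDecide, pvTruthy, pvBrand]
  | some abs =>
    cases abs with
    | nil =>
      cases e with
      | none => simp [pvDecide, pvTruthy]
      | some ebs =>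
        cases ebs with
        | nil => simp [pvDecide, pvTruthy]
        | cons ex exs =>
          simp only [ne_eq, reduceCtorEq, not_false_iff, if_pos]
          refine List.filter_congr ?_
          intro p _
          rw [pv_set_scan, List.not_any_eq_all_not]
          simp [pvDecide, pvTruthy, pvBrand]
    | cons ax axs =>
      cases e with
      | none =>
        simp only [ne_eq, reduceCtorEq, not_false_iff, if_pos]
        refine List.filter_congr ?_
        intro p _
        rw [pv_set_scan]
        simp [pvDecide, pvTruthy, pvBrand]
      | some ebs =>
        cases ebs with
        | nil =>
          simp only [ne_eq, reduceCtorEq, not_false_iff, if_pos]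
          refine List.filter_congr ?_
          intro p _
          rw [pv_set_scan]
          simp [pvDecide, pvTruthy, pvBrand]
        | cons ex exs =>
          simp only [ne_eq, reduceCtorEq, not_false_iff, if_pos]
          rw [List.filter_filter]
          refine List.filter_congr ?_
          intro p _
          rw [pv_set_scan, pv_set_scan, List.not_any_eq_all_not]
          simp only [pvDecide, pvTruthy, pvBrand, Option.getD_some]
          by_cases h : ((ax :: axs).any fun x =>
              PySem.Str.lower x == PySem.Str.lower ((PySem.Dict.mk p).getD "brand" "")) = true
          · simp [h]
          · simp [Bool.eq_false_iff.mpr h]
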